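-- pv_equiv track=rewrite | github.com/chrisy/pychefalizer | pychefalizer/elex.py | mc
-- ===== SOURCE A (Python) =====
-- def mc(source, replacement):
-- 	if len(source) == 0 or len(replacement) == 0:
-- 		return ""
--
-- 	out = ""
-- 	i = 0
-- 	j = len(source) - 1
--
-- 	for c in replacement:
-- 		if source[i].isupper():
-- 			out += c.upper()
-- 		else:
-- 			out += c.lower()
--
-- 		if i < j:
-- 			i += 1
--
-- 	return out
-- ===== SOURCE B (Python) =====
-- def mc(source, replacement):
--     if not source or not replacement:
--         return ""
--     head = [c.upper() if s.isupper() else c.lower()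
--             for s, c in zip(source, replacement)]
--     n = len(source)
--     if len(replacement) > n:
--         last_upper = source[-1].isupper()
--         tail = [c.upper() if last_upper else c.lower()
--                 for c in replacement[n:]]
--     else:
--         tail = []
--     return "".join(head + tail)
-- ===== Notes on version B (the rewrite author's own statement) =====
-- stated objective: alternative
-- what changed: A's single loop with a clamped source index is replaced by two differently-shaped passes: a zip over (source, replacement) for the head and a uniform map keyed to source[-1]'s case for the overflow tail, joined at the end.
import Mathlib
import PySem

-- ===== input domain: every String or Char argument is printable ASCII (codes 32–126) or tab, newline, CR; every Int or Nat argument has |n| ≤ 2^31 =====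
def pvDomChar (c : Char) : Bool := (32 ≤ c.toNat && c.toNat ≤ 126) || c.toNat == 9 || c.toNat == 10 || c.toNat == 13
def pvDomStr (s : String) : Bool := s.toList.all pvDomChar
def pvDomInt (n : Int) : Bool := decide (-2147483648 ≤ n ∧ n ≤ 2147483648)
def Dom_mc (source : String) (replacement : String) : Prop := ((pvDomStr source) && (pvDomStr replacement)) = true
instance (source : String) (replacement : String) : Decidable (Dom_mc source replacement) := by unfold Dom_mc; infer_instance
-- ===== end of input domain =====

-- B replaces A's single clamped-index loop by a zip pass plus a uniform-case tail pass (different decomposition; same cost).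


-- ===== PORT A =====
-- A's loop: state (out, i); i is always a valid index of src (it starts at 0 and is
-- clamped at j = len-1), so src.getD st.2 ' ' is exact for Python's source[i].
def mc (source : String) (replacement : String) : String :=
  if source.toList.length = 0 ∨ replacement.toList.length = 0 then "" else
    let src := source.toList
    let j := src.length - 1
    let r := replacement.toList.foldl
      (fun (st : List Char × Nat) c =>
        (st.1 ++ [if PySem.Chars.isupper (src.getD st.2 ' ') then PySem.Chars.upperChar c
                  else PySem.Chars.lowerChar c],
         if st.2 < j then st.2 + 1 else st.2))
      ([], 0)
    String.ofList r.1

-- ===== PORT B =====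
-- zip pass over (source, replacement), then a uniform tail keyed to source[-1]'s case.
def mc_alt (source : String) (replacement : String) : String :=
  let src := source.toList
  let rep := replacement.toList
  if src.isEmpty || rep.isEmpty then "" else
    let head := (src.zip rep).map
      (fun p => if PySem.Chars.isupper p.1 then PySem.Chars.upperChar p.2
                else PySem.Chars.lowerChar p.2)
    let tail :=
      if src.length < rep.length then
        let lastUpper := PySem.Chars.isupper (src.getLastD ' ')
        (rep.drop src.length).map
          (fun c => if lastUpper then PySem.Chars.upperChar c else PySem.Chars.lowerChar c)
      else []
    String.ofList (head ++ tail)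

-- ===== PRECONDITION & SPEC =====
def Spec_mc (source : String) (replacement : String) (out : String) : Prop := out = mc_alt source replacement
instance (source : String) (replacement : String) (out : String) : Decidable (Spec_mc source replacement out) := by unfold Spec_mc; infer_instance

-- ===== CLAIM (what is proved, stated in full; the proofs are below) =====
def Claim_equal_mc : Prop := ∀ (source : String) (replacement : String), Dom_mc source replacement → Spec_mc source replacement (mc source replacement)

-- ===== LEMMAS AND PROOFS =====

-- the sequence of characters A's loop emits, as a recursion (proof-only helper)
def mcGo (src : List Char) (j : Nat) : List Char → Nat → List Char
  | [], _ => []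
  | c :: cs, i =>
    (if PySem.Chars.isupper (src.getD i ' ') then PySem.Chars.upperChar c
     else PySem.Chars.lowerChar c)
      :: mcGo src j cs (if i < j then i + 1 else i)

theorem mc_fold (src : List Char) (j : Nat) (l : List Char) : ∀ (out : List Char) (i : Nat),
    (l.foldl
      (fun (st : List Char × Nat) c =>
        (st.1 ++ [if PySem.Chars.isupper (src.getD st.2 ' ') then PySem.Chars.upperChar c
                  else PySem.Chars.lowerChar c],
         if st.2 < j then st.2 + 1 else st.2))
      (out, i)).1 = out ++ mcGo src j l i := by
  induction l with
  | nil => intro out i; simp [mcGo]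
  | cons c cs ih =>
    intro out i
    simp only [List.foldl_cons, mcGo, ih]
    simp

theorem mc_getD_last (src : List Char) :
    src.getD (src.length - 1) ' ' = src.getLastD ' ' := by
  simp [List.getD_eq_getElem?_getD, List.getLastD_eq_getLast?, List.getLast?_eq_getElem?]

theorem mcGo_last (src : List Char) (h : src ≠ []) (l : List Char) :
    mcGo src (src.length - 1) l (src.length - 1)
      = l.map (fun c => if PySem.Chars.isupper (src.getLastD ' ') then PySem.Chars.upperChar c
                        else PySem.Chars.lowerChar c) := by
  induction l with
  | nil => simp [mcGo]
  | cons c cs ih =>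
    simp only [mcGo, mc_getD_last src]
    simp [ih]

theorem mcGo_eq (src : List Char) (h : src ≠ []) : ∀ (l : List Char) (i : Nat), i < src.length →
    mcGo src (src.length - 1) l i
      = (l.zip (src.drop i)).map
          (fun p => if PySem.Chars.isupper p.2 then PySem.Chars.upperChar p.1
                    else PySem.Chars.lowerChar p.1)
        ++ (l.drop (src.length - i)).map
          (fun c => if PySem.Chars.isupper (src.getLastD ' ') then PySem.Chars.upperChar c
                    else PySem.Chars.lowerChar c) := by
  intro l
  induction l with
  | nil => intro i hi; simp [mcGo]
  | cons c cs ih =>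
    intro i hi
    by_cases hij : i < src.length - 1
    · have hdrop : src.drop i = src[i] :: src.drop (i + 1) :=
        List.drop_eq_getElem_cons hi
      have hni : src.length - i = (src.length - (i + 1)) + 1 := by omega
      simp only [mcGo, if_pos hij, ih (i + 1) (by omega), hdrop, List.zip_cons_cons,
        List.map_cons, hni, List.drop_succ_cons, List.cons_append]
      congr 2
      simp [List.getD_eq_getElem?_getD, List.getElem?_eq_getElem hi]
    · have hie : i = src.length - 1 := by omega
      subst hie
      rw [mcGo_last src h]
      have hdrop : src.drop (src.length - 1) = [src.getLastD ' '] := by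
        have h1 : src.length - 1 < src.length := by
          cases src with
          | nil => exact absurd rfl h
          | cons a as => simp
        rw [List.drop_eq_getElem_cons h1]
        have : src.length - 1 + 1 = src.length := by
          cases src with
          | nil => exact absurd rfl h
          | cons a as => simp
        rw [this, List.drop_length]
        congr 1
        rw [← mc_getD_last src]
        simp [List.getD_eq_getElem?_getD, List.getElem?_eq_getElem h1]
      have hsub : src.length - (src.length - 1) = 1 := by
        cases src with
        | nil => exact absurd rfl h
        | cons a as => simp
      simp [hdrop, hsub]

theorem zip_map_comm {α β γ : Type} (f : α → β → γ) : ∀ (a : List α) (b : List β),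
    (a.zip b).map (fun p => f p.1 p.2) = (b.zip a).map (fun p => f p.2 p.1) := by
  intro a
  induction a with
  | nil => intro b; cases b <;> simp
  | cons x xs ih =>
    intro b
    cases b with
    | nil => simp
    | cons y ys => simp [ih]

-- ===== VERDICT (by name: the statement is the Claim_ definition above) =====
theorem mc_spec : Claim_equal_mc := by
  unfold Claim_equal_mc
  intro source replacement _
  unfold Spec_mc mc mc_alt
  by_cases hs : source.toList.length = 0
  · simp [List.length_eq_zero_iff.mp hs]
  · by_cases hr : replacement.toList.length = 0
    · simp [List.length_eq_zero_iff.mp hr]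
    · have hsne : source.toList ≠ [] := by
        intro hn; exact hs (by simp [hn])
      have hrne : replacement.toList ≠ [] := by
        intro hn; exact hr (by simp [hn])
      rw [if_neg (by tauto)]
      rw [if_neg (by simp [List.isEmpty_iff, hsne, hrne])]
      simp only
      rw [mc_fold, List.nil_append,
        mcGo_eq source.toList hsne replacement.toList 0 (by omega)]
      rw [zip_map_comm
        (fun (c s : Char) => if PySem.Chars.isupper s then PySem.Chars.upperChar c
          else PySem.Chars.lowerChar c)]
      simp only [List.drop_zero, Nat.sub_zero]
      congr 1
      by_cases hlt : source.toList.length < replacement.toList.length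
      · simp
      · rw [if_neg hlt, List.drop_eq_nil_of_le (by omega), List.map_nil]
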